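-- pv_equiv track=rewrite | github.com/0ff5ec/Programming | countPrimeSetBits.py | isPrimeSetBits
-- ===== SOURCE A (Python) =====
-- def isPrimeSetBits(num):
--     prime = [2,3,5,7,11,13,17,19]
--     setBits = 0
--     while num != 0:
--         if num%2 == 1:
--             setBits += 1
--         num = num//2
--     return True if setBits in prime else False
-- ===== SOURCE B (Python) =====
-- def isPrimeSetBits(num):
--     setBits = 0
--     while num != 0:
--         num &= num - 1
--         setBits += 1
--     return setBits in {2, 3, 5, 7, 11, 13, 17, 19}
-- ===== Notes on version B (the rewrite author's own statement) =====
-- stated objective: alternative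
-- what changed: Counts set bits with Brian Kernighan's trick (clearing the lowest set bit each iteration, so the loop runs once per set bit instead of once per bit position) and tests membership in a set literal instead of a list.
import Mathlib
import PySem

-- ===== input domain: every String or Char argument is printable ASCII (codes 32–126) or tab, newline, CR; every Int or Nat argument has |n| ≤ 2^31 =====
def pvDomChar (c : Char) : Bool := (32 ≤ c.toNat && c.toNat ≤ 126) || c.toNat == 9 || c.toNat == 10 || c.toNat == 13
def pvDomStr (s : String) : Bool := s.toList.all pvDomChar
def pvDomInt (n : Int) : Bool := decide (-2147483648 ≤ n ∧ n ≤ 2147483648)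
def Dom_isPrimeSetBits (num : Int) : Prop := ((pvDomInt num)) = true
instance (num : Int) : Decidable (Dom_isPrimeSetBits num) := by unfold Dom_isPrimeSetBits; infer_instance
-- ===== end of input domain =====

-- B counts set bits with Kernighan's num &= num-1 loop (one iteration per set bit) and tests a set literal; A shifts through every bit. Return-value equivalence on num ≥ 0 (both loop forever on negatives).


-- ===== PORT A =====
-- while num != 0: if num%2 == 1: setBits += 1; num = num//2
-- (the 'num < 0' branch is a totality guard only: Python loops forever there, outside Pre_)
def isPrimeSetBitsLoop (num setBits : Int) : Int :=
  if num = 0 then setBits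
  else if num < 0 then setBits
  else isPrimeSetBitsLoop (PySem.Int.floordiv num 2)
    (if PySem.Int.mod num 2 = 1 then setBits + 1 else setBits)
termination_by num.toNat
decreasing_by
  rw [PySem.Int.floordiv_eq_ediv_of_pos (by omega)]
  omega

def isPrimeSetBits (num : Int) : Bool :=
  let prime : List Int := [2, 3, 5, 7, 11, 13, 17, 19]
  let setBits := isPrimeSetBitsLoop num 0
  if prime.contains setBits then true else false

-- ===== PORT B =====
-- while num != 0: num &= num - 1; setBits += 1
-- (the 'num < 0' branch is a totality guard only: Python loops forever there, outside Pre_)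
def kernighanLoop (num setBits : Int) : Int :=
  if num = 0 then setBits
  else if num < 0 then setBits
  else kernighanLoop (PySem.Int.band num (num - 1)) (setBits + 1)
termination_by num.toNat
decreasing_by
  rw [PySem.Int.band_of_nonneg (by omega) (by omega)]
  have h := Nat.and_le_right (n := num.toNat) (m := (num - 1).toNat)
  omega

def isPrimeSetBits_alt (num : Int) : Bool :=
  (PySem.Set.ofList ([2, 3, 5, 7, 11, 13, 17, 19] : List Int)).contains (kernighanLoop num 0)

-- ===== PRECONDITION & SPEC =====
-- Pre_ excludes negative num, on which A's while loop never terminates (num//2 stays -1); B loops forever there too.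
def Pre_isPrimeSetBits (num : Int) : Prop := 0 ≤ num
instance (num : Int) : Decidable (Pre_isPrimeSetBits num) := by unfold Pre_isPrimeSetBits; infer_instance
def pvWitness_isPrimeSetBits : Int := (6)

def Spec_isPrimeSetBits (num : Int) (out : Bool) : Prop := out = isPrimeSetBits_alt num
instance (num : Int) (out : Bool) : Decidable (Spec_isPrimeSetBits num out) := by unfold Spec_isPrimeSetBits; infer_instance

-- ===== CLAIM (what is proved, stated in full; the proofs are below) =====
def Claim_equal_isPrimeSetBits : Prop := ∀ (num : Int), Dom_isPrimeSetBits num → Pre_isPrimeSetBits num → Spec_isPrimeSetBits num (isPrimeSetBits num)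

-- ===== LEMMAS AND PROOFS =====

/-- reference popcount on Nat -/
def pc (n : Nat) : Nat :=
  if n = 0 then 0 else pc (n / 2) + n % 2
termination_by n
decreasing_by omega

theorem pc_zero : pc 0 = 0 := by simp [pc]

theorem pc_pos (n : Nat) (h : n ≠ 0) : pc n = pc (n / 2) + n % 2 := by
  rw [pc]; simp [h]

/-- Kernighan step, odd case: (2k+1) &&& 2k = 2k -/
theorem land_odd (k : Nat) : (2 * k + 1) &&& (2 * k) = 2 * k := by
  apply Nat.eq_of_testBit_eq
  intro i
  cases i with
  | zero =>
    simp only [Nat.testBit_zero]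
    have h1 : (2 * k + 1) % 2 = 1 := by omega
    have h2 : (2 * k) % 2 = 0 := by omega
    simp [h1, h2]
  | succ j =>
    have h1 : (2 * k + 1) / 2 = k := by omega
    have h2 : (2 * k) / 2 = k := by omega
    rw [Nat.testBit_land]
    simp only [Nat.testBit_add_one]
    rw [h1, h2, Bool.and_self]

/-- Kernighan step, even case: (2k) &&& (2k-1) = 2*(k &&& (k-1)) for k > 0 -/
theorem land_even (k : Nat) (hk : 0 < k) : (2 * k) &&& (2 * k - 1) = 2 * (k &&& (k - 1)) := by
  apply Nat.eq_of_testBit_eq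
  intro i
  cases i with
  | zero =>
    simp only [Nat.testBit_zero]
    have h1 : (2 * k) % 2 = 0 := by omega
    have h2 : (2 * (k &&& (k - 1))) % 2 = 0 := by omega
    simp [h1, h2]
  | succ j =>
    have h1 : (2 * k) / 2 = k := by omega
    have h2 : (2 * k - 1) / 2 = k - 1 := by omega
    have h3 : (2 * (k &&& (k - 1))) / 2 = k &&& (k - 1) := by omega
    rw [Nat.testBit_land]
    simp only [Nat.testBit_add_one]
    rw [h1, h2, h3, Nat.testBit_land]

/-- Kernighan's identity: clearing the lowest set bit drops the popcount by one. -/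
theorem pc_land_pred (n : Nat) (h : n ≠ 0) : pc (n &&& (n - 1)) + 1 = pc n := by
  induction n using Nat.strong_induction_on with
  | _ n ih =>
    rcases Nat.even_or_odd n with he | ho
    · obtain ⟨k, hk⟩ := he
      have hk2 : n = 2 * k := by omega
      have hkpos : 0 < k := by omega
      subst hk2
      rw [land_even k hkpos]
      by_cases hz : k &&& (k - 1) = 0
      · rw [hz]
        have h1 : pc (2 * 0) = 0 := by simp [pc_zero]
        rw [Nat.mul_zero, pc_zero, pc_pos (2 * k) (by omega)]
        have h2 : (2 * k) / 2 = k := by omega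
        have h3 : (2 * k) % 2 = 0 := by omega
        rw [h2, h3]
        have := ih k (by omega) (by omega)
        rw [hz, pc_zero] at this
        omega
      · rw [pc_pos (2 * (k &&& (k - 1))) (by omega)]
        have h3 : (2 * (k &&& (k - 1))) / 2 = k &&& (k - 1) := by omega
        have h4 : (2 * (k &&& (k - 1))) % 2 = 0 := by omega
        rw [h3, h4, pc_pos (2 * k) (by omega)]
        have h5 : (2 * k) / 2 = k := by omega
        have h6 : (2 * k) % 2 = 0 := by omega
        rw [h5, h6]
        have := ih k (by omega) (by omega)
        omega
    · obtain ⟨k, hk⟩ := ho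
      subst hk
      have h1 : 2 * k + 1 - 1 = 2 * k := by omega
      rw [h1, land_odd k, pc_pos (2 * k + 1) (by omega)]
      have h2 : (2 * k + 1) / 2 = k := by omega
      have h3 : (2 * k + 1) % 2 = 1 := by omega
      rw [h2, h3]
      by_cases hz : k = 0
      · subst hz; simp [pc_zero]
      · rw [pc_pos (2 * k) (by omega)]
        have h4 : (2 * k) / 2 = k := by omega
        have h5 : (2 * k) % 2 = 0 := by omega
        rw [h4, h5]

/-- A's loop computes setBits + popcount. -/
theorem loopA_eq (n : Nat) : ∀ s : Int, isPrimeSetBitsLoop (n : Int) s = s + (pc n : Int) := by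
  induction n using Nat.strong_induction_on with
  | _ n ih =>
    intro s
    by_cases hz : n = 0
    · subst hz; rw [isPrimeSetBitsLoop]; simp [pc_zero]
    · rw [isPrimeSetBitsLoop]
      have hne : (n : Int) ≠ 0 := by exact_mod_cast hz
      have hnn : ¬ ((n : Int) < 0) := by omega
      simp only [hne, hnn, if_false]
      have hfd : PySem.Int.floordiv (n : Int) 2 = ((n / 2 : Nat) : Int) := by
        exact_mod_cast PySem.Int.floordiv_natCast n 2
      have hmd : PySem.Int.mod (n : Int) 2 = ((n % 2 : Nat) : Int) := by
        exact_mod_cast PySem.Int.mod_natCast n 2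
      rw [hfd, hmd, ih (n / 2) (by omega), pc_pos n hz]
      rcases Nat.mod_two_eq_zero_or_one n with h2 | h2 <;> simp [h2] <;> omega

/-- B's loop computes setBits + popcount (Kernighan). -/
theorem loopB_eq (n : Nat) : ∀ s : Int, kernighanLoop (n : Int) s = s + (pc n : Int) := by
  induction n using Nat.strong_induction_on with
  | _ n ih =>
    intro s
    by_cases hz : n = 0
    · subst hz; rw [kernighanLoop]; simp [pc_zero]
    · rw [kernighanLoop]
      have hne : (n : Int) ≠ 0 := by exact_mod_cast hz
      have hnn : ¬ ((n : Int) < 0) := by omega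
      simp only [hne, hnn, if_false]
      have hcast : (n : Int) - 1 = ((n - 1 : Nat) : Int) := by omega
      rw [hcast, PySem.Int.band_natCast]
      have hlt : n &&& (n - 1) < n := by
        have := Nat.and_le_right (n := n) (m := n - 1)
        omega
      rw [ih (n &&& (n - 1)) hlt]
      have := pc_land_pred n hz
      omega

-- ===== VERDICT (by name: the statement is the Claim_ definition above) =====
theorem isPrimeSetBits_spec : Claim_equal_isPrimeSetBits := by
  intro num _ hpre
  have hpre' : 0 ≤ num := hpre
  unfold Spec_isPrimeSetBits isPrimeSetBits isPrimeSetBits_alt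
  have hn : num = ((num.toNat : Nat) : Int) := by omega
  rw [hn, loopA_eq num.toNat 0, loopB_eq num.toNat 0]
  simp [PySem.Set.ofList]
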